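-- pv_equiv track=rewrite | github.com/mryingster/ProjectEuler | problem_118.py | recurse
-- ===== SOURCE A (Python) =====
-- import math, array
--
-- def isPrime(n):
--     if n < 2: return False
--     if n == 2: return True
--     if n % 2 == 0: return False
--     lim = int(math.sqrt(n))+1
--     for i in range(3, lim, 2):
--       if n % i == 0:
--           return False
--     return True;
--
-- def recurse(num, prev, count):
--     l = len(str(num))                                   # Get number of digits
--     i = 1                                               # Start with only first digit
--     while i <= l:
--         leftTrunc = int(str(num)[:i])                   # Truncate from left, 1 at a time
--         if isPrime(leftTrunc) and leftTrunc > prev:     # If truncation is prime and ordered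
--             if i == l:                                  # If truncation is also remainder of num
--                 return count+1                          # Set found. Increment count!
--             newTrunc = int(str(num)[i:])                # Get rest of number,
--             count = recurse(newTrunc, leftTrunc, count) # And feed it back into recurse
--         i += 1                                          # Increase size of truncation by 1
--     return count
-- ===== SOURCE B (Python) =====
-- import math
--
-- def isPrime(n):
--     if n < 2: return False
--     if n == 2: return True
--     if n % 2 == 0: return False
--     lim = int(math.sqrt(n))+1
--     for i in range(3, lim, 2):
--       if n % i == 0:
--           return False
--     return True
--
-- def recurse(num, prev, count):
--     # Direct summation: add each prefix's subcount to a running total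
--     # instead of threading the accumulator through the recursion.
--     s = str(num)
--     l = len(s)
--     total = count
--     for i in range(1, l + 1):
--         leftTrunc = int(s[:i])
--         if isPrime(leftTrunc) and leftTrunc > prev:
--             if i == l:
--                 total += 1
--             else:
--                 total += recurse(int(s[i:]), leftTrunc, 0)
--     return total
-- ===== Notes on version B (the rewrite author's own statement) =====
-- stated objective: alternative
-- what changed: B replaces A's accumulator-threading recursion (count passed down and returned through every recursive call, with an early return inside the while loop) by a direct summation: each valid prime prefix contributes an independent subcount recurse(rest, left, 0) added to a running total.
import Mathlib
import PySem

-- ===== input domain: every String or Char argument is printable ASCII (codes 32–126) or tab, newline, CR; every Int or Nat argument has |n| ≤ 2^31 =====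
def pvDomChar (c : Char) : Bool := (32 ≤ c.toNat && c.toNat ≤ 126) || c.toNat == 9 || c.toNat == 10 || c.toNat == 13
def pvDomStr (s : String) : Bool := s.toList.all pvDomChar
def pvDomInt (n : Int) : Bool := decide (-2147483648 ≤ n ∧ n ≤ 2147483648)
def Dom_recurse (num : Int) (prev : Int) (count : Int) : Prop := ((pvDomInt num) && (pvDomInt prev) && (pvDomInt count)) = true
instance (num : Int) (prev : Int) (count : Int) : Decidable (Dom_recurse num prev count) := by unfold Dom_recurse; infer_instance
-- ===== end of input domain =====

-- B changes the decomposition: direct summation of independent subcounts instead of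
-- threading the accumulator through the recursion; equivalence of return values only.

-- ===== PORT A =====

-- shared helper: isPrime, identical in Source A and Source B.
-- int(math.sqrt(n)) is ported as Int.sqrt; exact for 0 ≤ n ≤ 2^31 (double sqrt is
-- correctly rounded and the true root is far from the rounding boundary there).
def pyIsPrime (n : Int) : Bool :=
  if n < 2 then false
  else if n = 2 then true
  else if PySem.Int.mod n 2 = 0 then false
  else
    let lim := Int.sqrt n + 1
    ¬ (PySem.List.pyRange 3 lim 2).any (fun i => PySem.Int.mod n i = 0)

-- A's recursion has no structural measure in Lean, so both ports take the same
-- fuel = len(str(num)); one unit is consumed per recursive call, and each call's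
-- argument int(str(num)[i:]) (i ≥ 1) has strictly fewer digits, so the fuel never
-- runs out on the inputs Python reaches.
mutual
  -- the while loop of A: i counts up, count is threaded, early return at i == l
  def loopA (f : Nat) (s : List Char) (l : Int) (prev : Int) (i : Int) (count : Int) : Int :=
    if h : i ≤ l then
      let leftTrunc := (PySem.Int.ofChars? (PySem.List.slice s none (some i))).getD 0
      if pyIsPrime leftTrunc && decide (leftTrunc > prev) then
        if i = l then count + 1
        else
          let newTrunc := (PySem.Int.ofChars? (PySem.List.slice s (some i) none)).getD 0
          loopA f s l prev (i + 1) (recurseFuelA f newTrunc leftTrunc count)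
      else loopA f s l prev (i + 1) count
    else count
  termination_by (f, (l + 1 - i).toNat)
  decreasing_by
    · exact Prod.Lex.right f (by omega)
    · exact Prod.Lex.right f (by omega)
    · exact Prod.Lex.right f (by omega)

  def recurseFuelA (f : Nat) (num : Int) (prev : Int) (count : Int) : Int :=
    match f with
    | 0 => count   -- fuel exhausted (unreachable from Python-reachable inputs)
    | Nat.succ f' =>
      let s := PySem.Int.toChars num
      loopA f' s (s.length : Int) prev 1 count
  termination_by (f, 0)
end

def recurse (num : Int) (prev : Int) (count : Int) : Int :=
  recurseFuelA (PySem.Int.toChars num).length num prev count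

-- ===== PORT B =====

def recurseFuelB (f : Nat) (num : Int) (prev : Int) (count : Int) : Int :=
  match f with
  | 0 => count   -- fuel exhausted (unreachable from Python-reachable inputs)
  | Nat.succ f' =>
    let s := PySem.Int.toChars num
    let l : Int := (s.length : Int)
    (PySem.List.pyRange 1 (l + 1) 1).foldl
      (fun total i =>
        let leftTrunc := (PySem.Int.ofChars? (PySem.List.slice s none (some i))).getD 0
        if pyIsPrime leftTrunc && decide (leftTrunc > prev) then
          if i = l then total + 1
          else total + recurseFuelB f' ((PySem.Int.ofChars? (PySem.List.slice s (some i) none)).getD 0) leftTrunc 0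
        else total)
      count

def recurse_alt (num : Int) (prev : Int) (count : Int) : Int :=
  recurseFuelB (PySem.Int.toChars num).length num prev count

-- ===== PRECONDITION & SPEC =====
-- A raises ValueError for num < 0 (int('-') on the first prefix of str(num)); excluded.
def Pre_recurse (num : Int) (prev : Int) (count : Int) : Prop := 0 ≤ num
instance (num : Int) (prev : Int) (count : Int) : Decidable (Pre_recurse num prev count) := by unfold Pre_recurse; infer_instance
def pvWitness_recurse : Int × Int × Int := (2357, 0, 0)

def Spec_recurse (num : Int) (prev : Int) (count : Int) (out : Int) : Prop := out = recurse_alt num prev count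
instance (num : Int) (prev : Int) (count : Int) (out : Int) : Decidable (Spec_recurse num prev count out) := by unfold Spec_recurse; infer_instance

-- ===== CLAIM (what is proved, stated in full; the proofs are below) =====
def Claim_equal_recurse : Prop := ∀ (num : Int) (prev : Int) (count : Int), Dom_recurse num prev count → Pre_recurse num prev count → Spec_recurse num prev count (recurse num prev count)

-- ===== LEMMAS AND PROOFS =====

-- a foldl whose step is shift-equivariant is additive in its start value
theorem foldl_shift {α : Type} (g : Int → α → Int)
    (hg : ∀ a x c, g (c + a) x = c + g a x) :
    ∀ (xs : List α) (c a : Int), xs.foldl g (c + a) = c + xs.foldl g a := by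
  intro xs
  induction xs with
  | nil => intro c a; rfl
  | cons x xs ih => intro c a; simp only [List.foldl_cons, hg, ih]

-- B's running total is additive in its starting value.
theorem recurseFuelB_shift (f : Nat) (num prev count : Int) :
    recurseFuelB f num prev count = count + recurseFuelB f num prev 0 := by
  cases f with
  | zero => simp [recurseFuelB]
  | succ f' =>
    simp only [recurseFuelB]
    have := foldl_shift
      (fun total i =>
        let leftTrunc := (PySem.Int.ofChars? (PySem.List.slice (PySem.Int.toChars num) none (some i))).getD 0
        if pyIsPrime leftTrunc && decide (leftTrunc > prev) then
          if i = ((PySem.Int.toChars num).length : Int) then total + 1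
          else total + recurseFuelB f' ((PySem.Int.ofChars? (PySem.List.slice (PySem.Int.toChars num) (some i) none)).getD 0) leftTrunc 0
        else total)
      (by
        intro a x c
        simp only []
        split_ifs <;> ring)
      (PySem.List.pyRange 1 (((PySem.Int.toChars num).length : Int) + 1) 1) count 0
    simpa using this

-- A's while loop from position i equals B's fold over range(i, l+1) (same fuel for the
-- recursive calls), assuming the two recursions agree at the smaller fuel.
theorem loopA_eq (f' : Nat) (s : List Char) (l prev : Int)
    (IH : ∀ num prev count, recurseFuelA f' num prev count = recurseFuelB f' num prev count) :
    ∀ (n : Nat) (i count : Int), l + 1 - i ≤ (n : Int) →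
      loopA f' s l prev i count =
        (PySem.List.pyRange i (l + 1) 1).foldl
          (fun total j =>
            let leftTrunc := (PySem.Int.ofChars? (PySem.List.slice s none (some j))).getD 0
            if pyIsPrime leftTrunc && decide (leftTrunc > prev) then
              if j = l then total + 1
              else total + recurseFuelB f' ((PySem.Int.ofChars? (PySem.List.slice s (some j) none)).getD 0) leftTrunc 0
            else total)
          count := by
  intro n
  induction n with
  | zero =>
    intro i count hle
    rw [loopA, PySem.List.pyRange_one_eq_nil (by omega)]
    simp only [List.foldl_nil]
    rw [dif_neg (show ¬ i ≤ l by omega)]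
  | succ n ihn =>
    intro i count hle
    by_cases hi : i ≤ l
    · rw [loopA, dif_pos hi, PySem.List.pyRange_one_cons (by omega), List.foldl_cons]
      simp only []
      by_cases hp : (pyIsPrime ((PySem.Int.ofChars? (PySem.List.slice s none (some i))).getD 0)
            && decide (((PySem.Int.ofChars? (PySem.List.slice s none (some i))).getD 0) > prev)) = true
      · rw [if_pos hp, if_pos hp]
        by_cases hil : i = l
        · rw [if_pos hil, if_pos hil]
          subst hil
          rw [PySem.List.pyRange_one_eq_nil (by omega)]
          rfl
        · rw [if_neg hil, if_neg hil]
          rw [ihn (i + 1) _ (by omega)]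
          congr 1
          rw [IH, recurseFuelB_shift]
      · rw [if_neg hp, if_neg hp]
        exact ihn (i + 1) count (by omega)
    · rw [loopA, dif_neg hi, PySem.List.pyRange_one_eq_nil (by omega)]
      rfl

-- A with accumulator count equals B (same fuel).
theorem recurseFuelA_eq (f : Nat) (num prev count : Int) :
    recurseFuelA f num prev count = recurseFuelB f num prev count := by
  induction f generalizing num prev count with
  | zero => simp [recurseFuelA, recurseFuelB]
  | succ f' ih =>
    rw [recurseFuelA, recurseFuelB]
    exact loopA_eq f' (PySem.Int.toChars num) ((PySem.Int.toChars num).length : Int) prev ih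
      ((PySem.Int.toChars num).length + 1) 1 count (by push_cast; omega)

-- ===== VERDICT (by name: the statement is the Claim_ definition above) =====
theorem recurse_spec : Claim_equal_recurse := by
  intro num prev count _ _
  unfold Spec_recurse recurse recurse_alt
  exact recurseFuelA_eq _ _ _ _
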